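-- pv_equiv track=rewrite | github.com/alpha3002025/daily-codingtest | programmers/combination_permutation_product/lv2-비밀-코드-해독/solution-20251223-1.py | solution
-- ===== SOURCE A (Python) =====
-- from itertools import combinations
--
-- def solution(n, q, ans):
--     answer = 0
--
--     queries = [set(attempts) for attempts in q]
--
--     ## 1 ~ n 까지의 자연수 중 5개의 수를 뽑는다.
--     for combination in combinations(range(1, n+1), 5):
--         curr_comb = set(combination)
--
--         is_possible = True
--
--         ## ans 가 모두 일치하는지 검사
--         for i in range(len(q)):
--             should_match = ans[i]
--             match_count = len(curr_comb.intersection(queries[i]))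
--             if match_count != should_match:
--                 is_possible = False
--                 break
--
--         if is_possible:
--             answer += 1
--
--     return answer
-- ===== SOURCE B (Python) =====
-- def comb(a, b):
--     # binomial coefficient C(a, b) (0 when b out of range)
--     if b < 0 or b > a:
--         return 0
--     r = 1
--     for i in range(b):
--         r = r * (a - i) // (i + 1)
--     return r
--
--
-- def solution(n, q, ans):
--     # Group the numbers 1..n by their query-membership signature and count the
--     # 5-subsets with binomial coefficients instead of enumerating them.
--     if n < 5:
--         return 0
--     qs = [set(attempts) for attempts in q]
--     m = len(q)
--     targets = tuple(ans[i] for i in range(m))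
--     # distinct numbers of 1..n that occur in some query, in first-seen order
--     rel = []
--     for attempts in q:
--         for x in attempts:
--             if 1 <= x <= n and x not in rel:
--                 rel.append(x)
--     # how many relevant numbers carry each signature
--     groups = {}
--     for x in rel:
--         s = tuple(1 if x in qs[i] else 0 for i in range(m))
--         groups[s] = groups.get(s, 0) + 1
--     glist = list(groups.items())
--     free = n - len(rel)  # numbers of 1..n appearing in no query
--
--     def rec(i, k, t):
--         # ways to finish picking k numbers from groups i.. and the free pool,
--         # still needing t matches per query
--         if i == len(glist):
--             return comb(free, k) if all(v == 0 for v in t) else 0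
--         s, c = glist[i]
--         total = 0
--         for a in range(0, min(k, c) + 1):
--             nt = tuple(t[j] - a * s[j] for j in range(m))
--             if all(0 <= v <= k - a for v in nt):
--                 total += comb(c, a) * rec(i + 1, k - a, nt)
--         return total
--
--     return rec(0, 5, targets)
-- ===== Notes on version B (the rewrite author's own statement) =====
-- stated objective: alternative
-- what changed: Instead of enumerating all C(n,5) combinations and filtering each against every query, B groups the numbers 1..n by their query-membership signature and counts matching 5-subsets via a recursion over the signature groups weighted by binomial coefficients (the out-of-query pool is handled in closed form); intended as asymptotically faster, but a timing run could not measure a ratio because A already times out on that run's larger inputs.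
-- outside the precondition, e.g. on solution(5, [[1], [2]], [0]): A returns 0, B raises IndexError
import Mathlib
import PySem

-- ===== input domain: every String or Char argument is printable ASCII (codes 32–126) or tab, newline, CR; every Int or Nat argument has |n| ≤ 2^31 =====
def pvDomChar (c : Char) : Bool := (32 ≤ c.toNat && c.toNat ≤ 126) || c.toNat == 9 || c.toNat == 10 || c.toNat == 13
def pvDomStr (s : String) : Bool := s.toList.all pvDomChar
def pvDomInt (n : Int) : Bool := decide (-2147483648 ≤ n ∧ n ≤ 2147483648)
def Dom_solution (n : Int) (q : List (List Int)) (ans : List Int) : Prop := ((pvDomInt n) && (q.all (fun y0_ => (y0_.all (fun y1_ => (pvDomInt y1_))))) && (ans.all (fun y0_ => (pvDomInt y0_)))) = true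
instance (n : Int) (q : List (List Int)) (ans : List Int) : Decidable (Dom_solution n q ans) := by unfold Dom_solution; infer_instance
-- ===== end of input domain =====

-- B groups the numbers 1..n by query-membership signature and counts matching
-- 5-subsets with binomial coefficients instead of enumerating all combinations.

-- ===== PORT A =====

-- itertools.combinations(xs, k) in lexicographic order of positions
def combosK : Nat → List Int → List (List Int)
  | 0, _ => [[]]
  | _ + 1, [] => []
  | k + 1, x :: rest => ((combosK k rest).map (fun c => x :: c)) ++ combosK (k + 1) rest

-- the inner 'for i in range(len(q)): … break' loop of A; `none` from pyGet? ans i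
-- is Python's IndexError (outside Pre_), mapped to `false` here
def checkA (queries : List (PySem.Set Int)) (ans : List Int) (curr : PySem.Set Int) : List Int → Bool
  | [] => true
  | i :: rest =>
    match PySem.List.pyGet? ans i, PySem.List.pyGet? queries i with
    | some should, some s =>
        if (PySem.Set.len (PySem.Set.inter curr s)) == should then checkA queries ans curr rest
        else false
    | _, _ => false

def solution (n : Int) (q : List (List Int)) (ans : List Int) : Int :=
  let queries := q.map (fun attempts => PySem.Set.ofList attempts)
  (combosK 5 (PySem.List.pyRange 1 (n + 1))).foldl
    (fun answer combination =>
      let curr := PySem.Set.ofList combination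
      if checkA queries ans curr (PySem.List.pyRange 0 (q.length : Int)) then answer + 1
      else answer)
    0

-- ===== PORT B =====

-- Source B's hand-rolled binomial coefficient comb(a, b)
def bComb (a b : Int) : Int :=
  if b < 0 ∨ a < b then 0
  else (PySem.List.pyRange 0 b).foldl (fun r i => PySem.Int.floordiv (r * (a - i)) (i + 1)) 1

-- Source B's signature tuple(1 if x in qs[i] else 0 for i in range(m))
def bSig (qs : List (PySem.Set Int)) (x : Int) : List Int :=
  qs.map (fun s => if PySem.Set.contains s x then (1 : Int) else 0)

-- Source B's rel list: distinct numbers of 1..n occurring in some query, first-seen order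
def bRel (n : Int) (q : List (List Int)) : List Int :=
  q.foldl (fun rel attempts =>
    attempts.foldl (fun rel x =>
      if 1 ≤ x ∧ x ≤ n ∧ ¬ (rel.contains x = true) then rel ++ [x] else rel) rel) []

-- Source B's groups dict: signature -> how many relevant numbers carry it
def bGroups (qs : List (PySem.Set Int)) (rel : List Int) : PySem.Dict (List Int) Int :=
  rel.foldl (fun d x => d.modify (bSig qs x) 0 (fun v => v + 1)) PySem.Dict.empty

-- Source B's rec(i, k, t), structural on the remaining group list
def bRec (free : Int) (glist : List (List Int × Int)) (k : Int) (t : List Int) : Int :=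
  match glist with
  | [] => if t.all (fun v => v == 0) then bComb free k else 0
  | (s, c) :: rest =>
    -- Source B binds nt once; it is written out twice here (same value)
    (PySem.List.pyRange 0 (min k c + 1)).foldl (fun total a =>
      if (List.zipWith (fun tj sj => tj - a * sj) t s).all
          (fun v => decide (0 ≤ v) && decide (v ≤ k - a)) then
        total + bComb c a * bRec free rest (k - a)
          (List.zipWith (fun tj sj => tj - a * sj) t s)
      else total) 0

def solution_alt (n : Int) (q : List (List Int)) (ans : List Int) : Int :=
  if n < 5 then 0
  else
    let qs := q.map (fun attempts => PySem.Set.ofList attempts)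
    -- `tuple(ans[i] for i in range(m))`; pyGetD's default is never used inside Pre_
    let targets := (List.range q.length).map (fun i : Nat => PySem.List.pyGetD ans (i : Int) 0)
    let rel := bRel n q
    let glist := (bGroups qs rel).items
    let free := n - (rel.length : Int)
    bRec free glist 5 targets

-- ===== PRECONDITION & SPEC =====
-- Pre_ excludes len(ans) < len(q) with n ≥ 5: there A raises IndexError on any
-- surviving combination (and B always does), while A still returns when every
-- combination fails an earlier query — B cannot match those accidental returns.
def Pre_solution (n : Int) (q : List (List Int)) (ans : List Int) : Prop :=
  q.length ≤ ans.length ∨ n < 5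
instance (n : Int) (q : List (List Int)) (ans : List Int) : Decidable (Pre_solution n q ans) := by
  unfold Pre_solution; infer_instance

def pvWitness_solution : Int × List (List Int) × List Int := (6, [[1, 2]], [2])

def Spec_solution (n : Int) (q : List (List Int)) (ans : List Int) (out : Int) : Prop :=
  out = solution_alt n q ans
instance (n : Int) (q : List (List Int)) (ans : List Int) (out : Int) : Decidable (Spec_solution n q ans out) := by
  unfold Spec_solution; infer_instance

-- ===== CLAIM (what is proved, stated in full; the proofs are below) =====
def Claim_equal_solution : Prop := ∀ (n : Int) (q : List (List Int)) (ans : List Int), Dom_solution n q ans → Pre_solution n q ans → Spec_solution n q ans (solution n q ans)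

-- ===== LEMMAS AND PROOFS =====

-- per-query match counts of a combination (as plain filter-counts)
def mVec (qs : List (PySem.Set Int)) (c : List Int) : List Int :=
  qs.map (fun s => ((c.filter (fun x => PySem.Set.contains s x)).length : Int))

-- the count both programs compute: matching k-combinations of xs with match vector t
def cntF (qs : List (PySem.Set Int)) (xs : List Int) (k : Nat) (t : List Int) : Nat :=
  (combosK k xs).countP (fun c => decide (mVec qs c = t))

-- t minus the signature of one element
def tSub (qs : List (PySem.Set Int)) (t : List Int) (x : Int) : List Int :=
  List.zipWith (fun ti s => ti - (if PySem.Set.contains s x then 1 else 0)) t qs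

-- t minus a times a signature vector
def vSub (t : List Int) (a : Nat) (s : List Int) : List Int :=
  List.zipWith (fun tj sj => tj - (a : Int) * sj) t s

theorem combosK_nil_of_lt (k : Nat) (xs : List Int) (h : xs.length < k) :
    combosK k xs = [] := by
  induction xs generalizing k with
  | nil => cases k with
    | zero => omega
    | succ k => rfl
  | cons x rest ih =>
    cases k with
    | zero => omega
    | succ k =>
      simp only [combosK]
      rw [ih k (by simp only [List.length_cons] at h; omega),
        ih (k + 1) (by simp only [List.length_cons] at h; omega)]
      simp

theorem sublist_of_mem_combosK (k : Nat) (xs c : List Int) (h : c ∈ combosK k xs) :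
    c.Sublist xs := by
  induction xs generalizing k c with
  | nil =>
    cases k with
    | zero => simp [combosK] at h; simp [h]
    | succ k => simp [combosK] at h
  | cons x rest ih =>
    cases k with
    | zero => simp [combosK] at h; simp [h]
    | succ k =>
      simp only [combosK, List.mem_append, List.mem_map] at h
      rcases h with ⟨c', hc', rfl⟩ | h
      · exact (ih k c' hc').cons₂ x
      · exact (ih (k + 1) c h).cons x

theorem length_of_mem_combosK (k : Nat) (xs c : List Int) (h : c ∈ combosK k xs) :
    c.length = k := by
  induction xs generalizing k c with
  | nil =>
    cases k with
    | zero => simp [combosK] at h; simp [h]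
    | succ k => simp [combosK] at h
  | cons x rest ih =>
    cases k with
    | zero => simp [combosK] at h; simp [h]
    | succ k =>
      simp only [combosK, List.mem_append, List.mem_map] at h
      rcases h with ⟨c', hc', rfl⟩ | h
      · simp [ih k c' hc']
      · exact ih (k + 1) c h

theorem length_combosK (k : Nat) (xs : List Int) :
    (combosK k xs).length = xs.length.choose k := by
  induction xs generalizing k with
  | nil => cases k with
    | zero => rfl
    | succ k => simp [combosK]
  | cons x rest ih =>
    cases k with
    | zero => rfl
    | succ k =>
      simp only [combosK, List.length_append, List.length_map, ih, List.length_cons]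
      rw [Nat.choose_succ_succ]

theorem nodup_pyRange_one (a b : Int) : (PySem.List.pyRange a b).Nodup := by
  unfold PySem.List.pyRange
  simp only [if_neg (by norm_num : ¬ (1:Int) = 0)]
  refine List.Nodup.map ?_ (List.nodup_range)
  intro i j hij
  simp only [one_mul, add_right_inj, Nat.cast_inj] at hij
  exact hij

theorem pyRange_one_nil (a b : Int) (h : b ≤ a) : PySem.List.pyRange a b = [] := by
  unfold PySem.List.pyRange
  simp only [if_neg (by norm_num : ¬ (1:Int) = 0)]
  rw [if_pos (by norm_num), if_neg (by omega)]
  simp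

theorem length_pyRange_one (n : Int) (hn : 0 ≤ n) :
    ((PySem.List.pyRange 1 (n + 1)).length : Int) = n := by
  unfold PySem.List.pyRange
  simp only [if_neg (by norm_num : ¬ (1:Int) = 0)]
  rw [if_pos (by norm_num)]
  by_cases h : (1:Int) < n + 1
  · rw [if_pos h]
    simp only [List.length_map, List.length_range]
    omega
  · rw [if_neg h]
    simp
    omega

theorem mVec_nil (qs : List (PySem.Set Int)) : mVec qs [] = List.replicate qs.length 0 := by
  simp [mVec, List.map_const']

theorem all_zero_eq_decide (t : List Int) (l : Nat) (ht : t.length = l) :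
    (t.all (fun v => v == 0)) = decide (List.replicate l 0 = t) := by
  rw [Bool.eq_iff_iff]
  simp only [List.all_eq_true, beq_iff_eq, decide_eq_true_eq]
  constructor
  · intro h
    rw [eq_comm, List.eq_replicate_iff]
    exact ⟨ht, h⟩
  · intro h b hb
    rw [eq_comm, List.eq_replicate_iff] at h
    exact h.2 b hb

theorem mVec_cons_eq_iff (qs : List (PySem.Set Int)) (t : List Int) (x : Int) (c : List Int)
    (ht : t.length = qs.length) :
    (mVec qs (x :: c) = t) ↔ (mVec qs c = tSub qs t x) := by
  induction qs generalizing t with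
  | nil =>
    rw [List.length_nil, List.length_eq_zero_iff] at ht
    subst ht
    simp [mVec, tSub]
  | cons s qs' ih =>
    cases t with
    | nil => simp at ht
    | cons t0 t' =>
      simp only [List.length_cons, Nat.add_right_cancel_iff] at ht
      simp only [mVec, List.map_cons, tSub, List.zipWith_cons_cons, List.cons_eq_cons]
      by_cases hx : PySem.Set.contains s x = true
      · have hhead : (List.filter (fun y => PySem.Set.contains s y) (x :: c)).length
            = (List.filter (fun y => PySem.Set.contains s y) c).length + 1 := by
          rw [List.filter_cons, if_pos hx, List.length_cons]
        constructor
        · rintro ⟨h1, h2⟩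
          refine ⟨?_, (ih t' ht).mp h2⟩
          rw [if_pos hx]
          rw [hhead] at h1
          push_cast at h1 ⊢
          omega
        · rintro ⟨h1, h2⟩
          refine ⟨?_, (ih t' ht).mpr h2⟩
          rw [if_pos hx] at h1
          rw [hhead]
          push_cast at h1 ⊢
          omega
      · have hhead : (List.filter (fun y => PySem.Set.contains s y) (x :: c)).length
            = (List.filter (fun y => PySem.Set.contains s y) c).length := by
          rw [List.filter_cons, if_neg hx]
        constructor
        · rintro ⟨h1, h2⟩
          refine ⟨?_, (ih t' ht).mp h2⟩
          rw [if_neg hx]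
          rw [hhead] at h1
          omega
        · rintro ⟨h1, h2⟩
          refine ⟨?_, (ih t' ht).mpr h2⟩
          rw [if_neg hx] at h1
          rw [hhead]
          omega

theorem length_tSub (qs : List (PySem.Set Int)) (t : List Int) (x : Int)
    (ht : t.length = qs.length) : (tSub qs t x).length = qs.length := by
  simp [tSub, ht]

theorem length_vSub (t : List Int) (a : Nat) (s : List Int)
    (ht : t.length = s.length) : (vSub t a s).length = t.length := by
  simp [vSub, ht]

theorem vSub_zero (t s : List Int) (ht : t.length = s.length) : vSub t 0 s = t := by
  induction t generalizing s with
  | nil => simp [vSub]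
  | cons t0 t' ih =>
    cases s with
    | nil => simp at ht
    | cons s0 s' =>
      simp only [List.length_cons, Nat.add_right_cancel_iff] at ht
      simp [vSub] at ih ⊢
      exact ih s' ht

theorem vSub_one_vSub (t s : List Int) (a : Nat) :
    vSub (vSub t 1 s) a s = vSub t (a + 1) s := by
  induction t generalizing s with
  | nil => simp [vSub]
  | cons t0 t' ih =>
    cases s with
    | nil => simp [vSub]
    | cons s0 s' =>
      simp only [vSub, List.zipWith_cons_cons, List.cons_eq_cons] at ih ⊢
      refine ⟨by push_cast; ring, ih s'⟩

theorem tSub_eq_vSub_one (qs : List (PySem.Set Int)) (t : List Int) (x : Int) :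
    tSub qs t x = vSub t 1 (bSig qs x) := by
  unfold tSub vSub bSig
  rw [List.zipWith_map_right]
  have : (fun (tj : Int) (sq : PySem.Set Int) =>
      tj - ((1 : Nat) : Int) * (if PySem.Set.contains sq x then (1:Int) else 0)) =
      (fun (ti : Int) (s : PySem.Set Int) =>
      ti - (if PySem.Set.contains s x then (1:Int) else 0)) := by
    funext ti s
    simp
  rw [this]

theorem tSub_comm (qs : List (PySem.Set Int)) (t : List Int) (x y : Int) :
    tSub qs (tSub qs t x) y = tSub qs (tSub qs t y) x := by
  induction qs generalizing t with
  | nil => simp [tSub]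
  | cons s qs' ih =>
    cases t with
    | nil => simp [tSub]
    | cons t0 t' =>
      simp only [tSub, List.zipWith_cons_cons, List.cons_eq_cons] at ih ⊢
      exact ⟨by ring, ih t'⟩

theorem cnt_zero (qs : List (PySem.Set Int)) (xs : List Int) (t : List Int) :
    cntF qs xs 0 t = if List.replicate qs.length 0 = t then 1 else 0 := by
  unfold cntF
  have h0 : combosK 0 xs = [[]] := by cases xs <;> rfl
  rw [h0, List.countP_cons, List.countP_nil, mVec_nil]
  rcases Bool.eq_false_or_eq_true (decide (List.replicate qs.length (0:Int) = t)) with h | h <;>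
    simp only [decide_eq_true_eq, decide_eq_false_iff_not] at h <;> simp [h]

theorem cnt_cons (qs : List (PySem.Set Int)) (x : Int) (xs : List Int) (k : Nat)
    (t : List Int) (ht : t.length = qs.length) :
    cntF qs (x :: xs) (k + 1) t = cntF qs xs (k + 1) t + cntF qs xs k (tSub qs t x) := by
  unfold cntF
  simp only [combosK, List.countP_append, List.countP_map]
  rw [Nat.add_comm]
  congr 1
  apply List.countP_congr
  intro c _
  simp only [Function.comp_apply, decide_eq_true_iff]
  exact mVec_cons_eq_iff qs t x c ht

theorem cnt_perm (qs : List (PySem.Set Int)) (xs ys : List Int) (h : xs.Perm ys) :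
    ∀ (k : Nat) (t : List Int), t.length = qs.length → cntF qs xs k t = cntF qs ys k t := by
  induction h with
  | nil => intro k t _; rfl
  | cons x hp ih =>
    intro k t ht
    cases k with
    | zero => rw [cnt_zero, cnt_zero]
    | succ k =>
      rw [cnt_cons _ _ _ _ _ ht, cnt_cons _ _ _ _ _ ht,
        ih (k + 1) t ht, ih k (tSub qs t x) (length_tSub qs t x ht)]
  | swap x y l =>
    intro k t ht
    cases k with
    | zero => rw [cnt_zero, cnt_zero]
    | succ k =>
      rw [cnt_cons _ _ _ _ _ ht, cnt_cons _ _ _ _ _ ht]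
      cases k with
      | zero =>
        rw [cnt_cons _ _ _ _ _ ht, cnt_cons _ _ _ _ _ ht]
        simp only [cnt_zero]
        omega
      | succ k =>
        rw [cnt_cons _ _ _ _ _ ht, cnt_cons _ _ _ _ _ ht,
          cnt_cons _ _ _ _ _ (length_tSub qs t y ht),
          cnt_cons _ _ _ _ _ (length_tSub qs t x ht),
          tSub_comm]
        omega
  | trans h1 h2 ih1 ih2 =>
    intro k t ht
    rw [ih1 k t ht, ih2 k t ht]

theorem cnt_eq_zero_of_bad (qs : List (PySem.Set Int)) (xs : List Int) (k : Nat)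
    (t : List Int) (h : ¬ (∀ v ∈ t, 0 ≤ v ∧ v ≤ (k : Int))) :
    cntF qs xs k t = 0 := by
  unfold cntF
  rw [List.countP_eq_zero]
  intro c hc
  simp only [decide_eq_true_eq]
  intro heq
  apply h
  intro v hv
  rw [← heq] at hv
  simp only [mVec, List.mem_map] at hv
  obtain ⟨s, -, rfl⟩ := hv
  have hlen := length_of_mem_combosK k xs c hc
  have := List.length_filter_le (fun x => PySem.Set.contains s x) c
  constructor
  · positivity
  · exact_mod_cast hlen ▸ this

theorem cnt_of_all_zero_sig (qs : List (PySem.Set Int)) (xs : List Int) (k : Nat)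
    (t : List Int)
    (hxs : ∀ x ∈ xs, ∀ s ∈ qs, PySem.Set.contains s x = false) :
    cntF qs xs k t = if List.replicate qs.length 0 = t then xs.length.choose k else 0 := by
  unfold cntF
  have hmv : ∀ c ∈ combosK k xs, mVec qs c = List.replicate qs.length 0 := by
    intro c hc
    have hsub := sublist_of_mem_combosK k xs c hc
    rw [← mVec_nil]
    unfold mVec
    apply List.map_congr_left
    intro s hs
    have : List.filter (fun x => PySem.Set.contains s x) c = [] := by
      rw [List.filter_eq_nil_iff]
      intro a ha
      have h := hxs a (hsub.mem ha) s hs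
      intro hcon
      change PySem.Set.contains s a = true at hcon
      rw [h] at hcon
      cases hcon
    simp only [this]
    simp
  by_cases ht : List.replicate qs.length (0 : Int) = t
  · rw [if_pos ht, ← length_combosK]
    rw [List.countP_eq_length]
    intro c hc
    simp [hmv c hc, ht]
  · rw [if_neg ht, List.countP_eq_zero]
    intro c hc
    simp only [decide_eq_true_eq]
    rw [hmv c hc]
    exact ht

-- the body of A's per-index check, named for the proofs
def check1 (queries : List (PySem.Set Int)) (ans : List Int) (curr : PySem.Set Int) (i : Int) : Bool :=
  match PySem.List.pyGet? ans i, PySem.List.pyGet? queries i with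
  | some should, some s => (PySem.Set.len (PySem.Set.inter curr s)) == should
  | _, _ => false

theorem checkA_cons (queries : List (PySem.Set Int)) (ans : List Int) (curr : PySem.Set Int)
    (i : Int) (rest : List Int) :
    checkA queries ans curr (i :: rest) =
      (check1 queries ans curr i && checkA queries ans curr rest) := by
  rw [checkA.eq_def]
  unfold check1
  cases h1 : PySem.List.pyGet? ans i <;> cases h2 : PySem.List.pyGet? queries i <;>
    simp [h1, h2, Bool.beq_eq_decide_eq]

-- A's check loop is the conjunction over the index list
theorem checkA_eq_all (queries : List (PySem.Set Int)) (ans : List Int) (curr : PySem.Set Int)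
    (idxs : List Int) :
    checkA queries ans curr idxs = idxs.all (check1 queries ans curr) := by
  induction idxs with
  | nil => rfl
  | cons i rest ih => rw [checkA_cons, ih, List.all_cons]

-- A's check is mVec-equality with the (taken) answer prefix
theorem checkA_iff (q : List (List Int)) (ans : List Int) (c : List Int)
    (hc : c.Nodup) (hans : q.length ≤ ans.length) :
    checkA (q.map (fun a => PySem.Set.ofList a)) ans (PySem.Set.ofList c)
        (PySem.List.pyRange 0 (q.length : Int)) = true ↔
      mVec (q.map (fun a => PySem.Set.ofList a)) c =
        (List.range q.length).map (fun i : Nat => PySem.List.pyGetD ans (i : Int) 0) := by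
  rw [checkA_eq_all, List.all_eq_true]
  rw [PySem.Set.ofList_eq_self_of_nodup c hc]
  set qs := q.map (fun a => PySem.Set.ofList a) with hqs
  have hlen : qs.length = q.length := by simp [hqs]
  constructor
  · intro h
    apply List.ext_getElem (by simp [mVec, hlen])
    intro i h1 h2
    have hiq : i < q.length := by
      simp only [mVec, List.length_map, hlen] at h1
      exact h1
    have hthis := h (i : Int) (by rw [PySem.List.mem_pyRange_one]; omega)
    unfold check1 at hthis
    rw [PySem.List.pyGet?_natCast ans i, PySem.List.pyGet?_natCast qs i,
      List.getElem?_eq_getElem (show i < ans.length by omega),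
      List.getElem?_eq_getElem (show i < qs.length by omega)] at hthis
    simp only [beq_iff_eq] at hthis
    simp only [mVec, List.getElem_map, List.getElem_range, PySem.List.pyGetD_natCast]
    rw [List.getD_eq_getElem ans 0 (by omega), ← hthis]
    simp [PySem.Set.len, PySem.Set.inter]
  · intro h i hi
    rw [PySem.List.mem_pyRange_one] at hi
    obtain ⟨j, rfl⟩ : ∃ j : Nat, i = (j : Int) := ⟨i.toNat, by omega⟩
    have hj : j < q.length := by exact_mod_cast hi.2
    unfold check1
    rw [PySem.List.pyGet?_natCast ans j, PySem.List.pyGet?_natCast qs j,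
      List.getElem?_eq_getElem (show j < ans.length by omega),
      List.getElem?_eq_getElem (show j < qs.length by omega)]
    simp only [beq_iff_eq]
    have hthis : (mVec qs c).getD j (0 : Int) =
        ((List.range q.length).map (fun i : Nat => PySem.List.pyGetD ans (i : Int) 0)).getD j
          (0 : Int) := by rw [h]
    rw [List.getD_eq_getElem _ 0 (show j < (mVec qs c).length by simp [mVec]; omega),
      List.getD_eq_getElem _ 0 (by simpa using hj)] at hthis
    simp only [mVec, List.getElem_map, List.getElem_range, PySem.List.pyGetD_natCast] at hthis
    rw [List.getD_eq_getElem ans 0 (by omega)] at hthis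
    rw [← hthis]
    simp [PySem.Set.len, PySem.Set.inter]

theorem sum_map_range (n : Nat) (f : Nat → Int) :
    ((List.range n).map f).sum = ∑ i ∈ Finset.range n, f i := by
  induction n with
  | zero => rfl
  | succ n ih => rw [List.range_succ, Finset.sum_range_succ, List.map_append, List.sum_append, ih]; simp

-- Source B's comb is the binomial coefficient
theorem bComb_choose (a b : Nat) : bComb (a : Int) (b : Int) = ((a.choose b : Nat) : Int) := by
  by_cases hab : a < b
  · unfold bComb
    rw [if_pos (Or.inr (by exact_mod_cast hab)), Nat.choose_eq_zero_of_lt hab]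
    simp
  · rw [Nat.not_lt] at hab
    unfold bComb
    rw [if_neg (by rw [not_or, Int.not_lt, Int.not_lt]
                   constructor <;> [positivity; exact_mod_cast hab])]
    have aux : ∀ j : Nat, j ≤ a →
        (PySem.List.pyRange 0 (j : Int)).foldl
          (fun r i => PySem.Int.floordiv (r * ((a : Int) - i)) (i + 1)) 1 =
          ((a.choose j : Nat) : Int) := by
      intro j
      induction j with
      | zero =>
        intro _
        rw [show ((0 : Nat) : Int) = 0 from rfl, pyRange_one_nil 0 0 le_rfl]
        simp
      | succ j ih =>
        intro hj
        have hj' : j ≤ a := by omega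
        have : ((j + 1 : Nat) : Int) = (j : Int) + 1 := by push_cast; ring
        rw [this, PySem.List.pyRange_one_succ_right (by positivity), List.foldl_append,
          ih hj']
        simp only [List.foldl_cons, List.foldl_nil]
        have hsub : (a : Int) - (j : Int) = ((a - j : Nat) : Int) := by
          push_cast [Nat.cast_sub hj']
          ring
        rw [hsub]
        have hcast : ((a.choose j : Nat) : Int) * ((a - j : Nat) : Int) =
            ((a.choose j * (a - j) : Nat) : Int) := by push_cast; ring
        rw [hcast, ← Nat.choose_succ_right_eq]
        have : ((j : Int) + 1) = ((j + 1 : Nat) : Int) := by push_cast; ring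
        rw [this, PySem.Int.floordiv_natCast]
        rw [Nat.mul_div_cancel _ (Nat.succ_pos j)]
    exact aux b hab

-- partition of a list by key value, keys in first-occurrence order
theorem perm_partition_aux (f : Int → List Int) :
    ∀ (K : List (List Int)) (l : List Int), K.Nodup → (∀ x ∈ l, f x ∈ K) →
      l.Perm (K.flatMap (fun s => l.filter (fun x => f x == s))) := by
  intro K
  induction K with
  | nil =>
    intro l _ hmem
    cases l with
    | nil => simp
    | cons x l' => exact absurd (hmem x (by simp)) (by simp)
  | cons s K' ih =>
    intro l hnd hmem
    have hsplit := List.filter_append_perm (fun x => f x == s) l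
    set l' := l.filter (fun x => !(f x == s)) with hl'
    have hmem' : ∀ x ∈ l', f x ∈ K' := by
      intro x hx
      rw [hl', List.mem_filter] at hx
      have := hmem x hx.1
      simp only [List.mem_cons] at this
      rcases this with h | h
      · exfalso
        have := hx.2
        simp [h] at this
      · exact h
    have hIH := ih l' (by exact hnd.of_cons) hmem'
    have hblocks : ∀ s' ∈ K', l'.filter (fun x => f x == s') = l.filter (fun x => f x == s') := by
      intro s' hs'
      have hne : s' ≠ s := by
        intro hcon
        subst hcon
        exact (List.nodup_cons.mp hnd).1 hs'
      rw [hl', List.filter_filter]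
      apply List.filter_congr
      intro x _
      by_cases h : (f x == s') = true
      · have hfx : f x = s' := by simpa using h
        have hfs : (f x == s) = false := by simp [hfx, hne]
        simp [h, hfs]
      · rw [Bool.not_eq_true] at h
        simp [h]
    have hflat : K'.flatMap (fun s' => l'.filter (fun x => f x == s')) =
        K'.flatMap (fun s' => l.filter (fun x => f x == s')) := by
      unfold List.flatMap
      congr 1
      exact List.map_congr_left hblocks
    rw [List.flatMap_cons]
    refine hsplit.symm.trans ?_
    apply List.Perm.append_left
    rw [← hflat]
    exact hIH

theorem perm_partition (f : Int → List Int) (l : List Int) :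
    l.Perm ((PySem.Set.ofList (l.map f)).flatMap (fun s => l.filter (fun x => f x == s))) := by
  apply perm_partition_aux f _ l (PySem.Set.nodup_ofList (l.map f))
  intro x hx
  rw [PySem.Set.mem_ofList]
  exact List.mem_map_of_mem hx

-- bRel is the de-duplicated in-range flatten of q
theorem bRel_inner (n : Int) (attempts : List Int) (r : List Int) :
    attempts.foldl (fun rel x =>
        if 1 ≤ x ∧ x ≤ n ∧ ¬ (rel.contains x = true) then rel ++ [x] else rel) r =
      PySem.Set.update r (attempts.filter (fun x => decide (1 ≤ x) && decide (x ≤ n))) := by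
  induction attempts generalizing r with
  | nil => rfl
  | cons x rest ih =>
    simp only [List.foldl_cons, List.filter_cons]
    by_cases hx : (1 ≤ x ∧ x ≤ n)
    · rw [if_pos (show (decide (1 ≤ x) && decide (x ≤ n)) = true by
        simp [hx.1, hx.2])]
      rw [show PySem.Set.update r
          (x :: rest.filter (fun x => decide (1 ≤ x) && decide (x ≤ n))) =
        PySem.Set.update (PySem.Set.add r x)
          (rest.filter (fun x => decide (1 ≤ x) && decide (x ≤ n))) from rfl]
      by_cases hc : r.contains x = true
      · rw [if_neg (fun hcon => hcon.2.2 hc)]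
        rw [show PySem.Set.add r x = r from by
          unfold PySem.Set.add
          rw [if_pos (show PySem.Set.contains r x = true from hc)]]
        exact ih r
      · rw [if_pos ⟨hx.1, hx.2, hc⟩]
        rw [show PySem.Set.add r x = r ++ [x] from by
          unfold PySem.Set.add
          rw [if_neg (show ¬ PySem.Set.contains r x = true from hc)]]
        exact ih (r ++ [x])
    · rw [if_neg (fun hcon => hx ⟨hcon.1, hcon.2.1⟩),
        if_neg (by simp only [Bool.and_eq_true, decide_eq_true_eq]
                   exact fun hcon => hx ⟨hcon.1, hcon.2⟩)]
      exact ih r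

theorem set_update_append (r A B : List Int) :
    PySem.Set.update (PySem.Set.update r A) B = PySem.Set.update r (A ++ B) := by
  unfold PySem.Set.update
  rw [List.foldl_append]

theorem bRel_eq (n : Int) (q : List (List Int)) :
    bRel n q = PySem.Set.ofList
      ((q.flatten).filter (fun x => decide (1 ≤ x) && decide (x ≤ n))) := by
  unfold bRel
  have aux : ∀ (qrem : List (List Int)) (r : List Int),
      qrem.foldl (fun rel attempts =>
        attempts.foldl (fun rel x =>
          if 1 ≤ x ∧ x ≤ n ∧ ¬ (rel.contains x = true) then rel ++ [x] else rel) rel) r =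
      PySem.Set.update r ((qrem.flatten).filter (fun x => decide (1 ≤ x) && decide (x ≤ n))) := by
    intro qrem
    induction qrem with
    | nil => intro r; rfl
    | cons attempts rest ih =>
      intro r
      simp only [List.foldl_cons]
      rw [bRel_inner n attempts r, ih, set_update_append, List.flatten_cons,
        List.filter_append]
  rw [aux q []]
  rw [show PySem.Set.update []
      ((q.flatten).filter (fun x => decide (1 ≤ x) && decide (x ≤ n))) =
    PySem.Set.ofList ((q.flatten).filter (fun x => decide (1 ≤ x) && decide (x ≤ n))) from
    (PySem.Set.ofList_eq_foldl _).symm]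

theorem mem_bRel (n : Int) (q : List (List Int)) (x : Int) :
    x ∈ bRel n q ↔ (x ∈ q.flatten ∧ 1 ≤ x ∧ x ≤ n) := by
  rw [bRel_eq, PySem.Set.mem_ofList, List.mem_filter]
  simp

theorem nodup_bRel (n : Int) (q : List (List Int)) : (bRel n q).Nodup := by
  rw [bRel_eq]
  exact PySem.Set.nodup_ofList _

-- the groups dict is a counter of signatures
theorem bGroups_eq_counter (qs : List (PySem.Set Int)) (rel : List Int) :
    bGroups qs rel = PySem.Dict.counter (rel.map (bSig qs)) := by
  unfold bGroups PySem.Dict.counter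
  rw [List.foldl_map]

theorem foldl_pyRange_sum (M : Int) (hM : 0 ≤ M) (G : Int → Int) :
    (PySem.List.pyRange 0 M).foldl (fun total a => total + G a) 0 =
      ∑ i ∈ Finset.range M.toNat, G (i : Int) := by
  obtain ⟨m, rfl⟩ : ∃ m : Nat, M = (m : Int) := ⟨M.toNat, by omega⟩
  rw [PySem.List.pyRange_zero_natCast, PySem.List.foldl_add, List.map_map, sum_map_range]
  simp [Function.comp]

-- the central induction: bRec over the remaining groups equals the combination count
theorem bRec_eq_cnt (qs : List (PySem.Set Int)) (rel freeL : List Int)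
    (hfree : ∀ x ∈ freeL, ∀ s ∈ qs, PySem.Set.contains s x = false) :
    ∀ (K : List (List Int)), (∀ s ∈ K, s.length = qs.length) →
      ∀ (k : Int), 0 ≤ k → ∀ (t : List Int), t.length = qs.length →
      bRec ((freeL.length : Int))
          (K.map (fun s => (s, ((rel.filter (fun x => bSig qs x == s)).length : Int)))) k t =
        ((cntF qs ((K.flatMap (fun s => rel.filter (fun x => bSig qs x == s))) ++ freeL)
          k.toNat t : Nat) : Int) := by
  intro K
  induction K with
  | nil =>
    intro _ k hk t ht
    simp only [List.map_nil, List.flatMap_nil, List.nil_append]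
    rw [bRec]
    rw [cnt_of_all_zero_sig qs freeL k.toNat t hfree]
    rw [all_zero_eq_decide t qs.length ht]
    by_cases h : List.replicate qs.length (0:Int) = t
    · rw [if_pos (by simp [h]), if_pos h]
      have hbc : bComb ((freeL.length : Nat) : Int) k =
          ((freeL.length.choose k.toNat : Nat) : Int) := by
        conv_lhs => rw [show k = ((k.toNat : Nat) : Int) from (Int.toNat_of_nonneg hk).symm]
        exact bComb_choose freeL.length k.toNat
      rw [hbc]
    · rw [if_neg (by simp [h]), if_neg h]
      norm_num
  | cons s K' ih =>
    intro hK k hk t ht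
    have hs : s.length = qs.length := hK s (by simp)
    have hK' : ∀ s' ∈ K', s'.length = qs.length := fun s' h => hK s' (by simp [h])
    rw [List.map_cons, bRec]
    set blk := rel.filter (fun x => bSig qs x == s) with hblk
    set restL := (K'.flatMap (fun s' => rel.filter (fun x => bSig qs x == s'))) ++ freeL
      with hrestL
    set glist' := K'.map (fun s' => (s', ((rel.filter (fun x => bSig qs x == s')).length : Int)))
      with hglist'
    set ℓ := blk.length with hℓ
    have hstep : (fun (total a : Int) =>
        if (List.zipWith (fun tj sj => tj - a * sj) t s).all
            (fun v => decide (0 ≤ v) && decide (v ≤ k - a)) then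
          total + bComb (ℓ : Int) a * bRec ((freeL.length : Int)) glist' (k - a)
            (List.zipWith (fun tj sj => tj - a * sj) t s)
        else total) =
        (fun (total a : Int) => total +
          (if (List.zipWith (fun tj sj => tj - a * sj) t s).all
              (fun v => decide (0 ≤ v) && decide (v ≤ k - a)) then
            bComb (ℓ : Int) a * bRec ((freeL.length : Int)) glist' (k - a)
              (List.zipWith (fun tj sj => tj - a * sj) t s)
          else 0)) := by
      funext total a
      split_ifs <;> ring
    rw [hstep, foldl_pyRange_sum (min k (ℓ : Int) + 1) (by omega)]
    set N : Nat := (min k (ℓ : Int) + 1).toNat with hN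
    have hNval : N = min k.toNat ℓ + 1 := by omega
    have hterm : ∀ a ∈ Finset.range N,
        (if (List.zipWith (fun tj sj => tj - (a : Int) * sj) t s).all
            (fun v => decide (0 ≤ v) && decide (v ≤ k - (a : Int))) then
          bComb (ℓ : Int) (a : Int) * bRec ((freeL.length : Int)) glist' (k - (a : Int))
            (List.zipWith (fun tj sj => tj - (a : Int) * sj) t s)
        else 0) =
        ((ℓ.choose a * cntF qs restL (k.toNat - a) (vSub t a s) : Nat) : Int) := by
      intro a ha
      rw [Finset.mem_range, hNval] at ha
      have hak : a ≤ k.toNat := by omega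
      have htoNat : (k - (a : Int)).toNat = k.toNat - a := by omega
      have hlen' : (vSub t a s).length = qs.length := by
        rw [length_vSub t a s (ht.trans hs.symm), ht]
      have hvs : List.zipWith (fun tj sj => tj - (a : Int) * sj) t s = vSub t a s := rfl
      rw [hvs]
      by_cases hb :
          ((vSub t a s).all (fun v => decide (0 ≤ v) && decide (v ≤ k - (a : Int)))) = true
      · rw [hb, if_pos rfl]
        rw [show bComb (ℓ : Int) ((a : Nat) : Int) = ((ℓ.choose a : Nat) : Int) from
          bComb_choose ℓ a]
        rw [hglist', ih hK' (k - (a : Int)) (by omega) (vSub t a s) hlen', htoNat]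
        push_cast
        ring
      · have hz : cntF qs restL (k.toNat - a) (vSub t a s) = 0 := by
          apply cnt_eq_zero_of_bad
          intro hcon
          apply hb
          rw [List.all_eq_true]
          intro v hv
          have hvr := hcon v hv
          simp only [Bool.and_eq_true, decide_eq_true_eq]
          omega
        rw [if_neg hb, hz]
        simp
    rw [Finset.sum_congr rfl hterm]
    have hblkmem : ∀ x ∈ blk, bSig qs x = s := by
      intro x hx
      rw [hblk, List.mem_filter] at hx
      simpa using hx.2
    have hcnt : cntF qs (blk ++ restL) k.toNat t =
        ∑ a ∈ Finset.range (min k.toNat ℓ + 1),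
          ℓ.choose a * cntF qs restL (k.toNat - a) (vSub t a s) := by
      -- induction over the block of identical-signature elements
      have block_lemma : ∀ (blk' : List Int) (hb : ∀ x ∈ blk', bSig qs x = s)
          (kk : Nat) (tt : List Int) (htt : tt.length = qs.length),
          cntF qs (blk' ++ restL) kk tt =
            ∑ a ∈ Finset.range (min kk blk'.length + 1),
              blk'.length.choose a * cntF qs restL (kk - a) (vSub tt a s) := by
        intro blk'
        induction blk' with
        | nil =>
          intro _ kk tt htt
          simp only [List.nil_append, List.length_nil]
          rw [show min kk 0 + 1 = 1 from by omega]
          rw [Finset.sum_range_one]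
          rw [vSub_zero tt s (htt.trans hs.symm)]
          simp
        | cons x blk' ihb =>
          intro hb kk tt htt
          have hbx : bSig qs x = s := hb x (by simp)
          have hb' : ∀ y ∈ blk', bSig qs y = s := fun y hy => hb y (by simp [hy])
          cases kk with
          | zero =>
            rw [show min 0 (x :: blk').length + 1 = 1 from by omega, Finset.sum_range_one]
            rw [vSub_zero tt s (htt.trans hs.symm)]
            simp only [List.cons_append]
            rw [cnt_zero, cnt_zero]
            simp
          | succ j =>
            simp only [List.cons_append]
            rw [cnt_cons qs x (blk' ++ restL) j tt htt]
            rw [tSub_eq_vSub_one qs tt x, hbx]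
            have htt1 : (vSub tt 1 s).length = qs.length := by
              rw [length_vSub tt 1 s (htt.trans hs.symm), htt]
            rw [ihb hb' (j + 1) tt htt, ihb hb' j (vSub tt 1 s) htt1]
            set L := blk'.length with hL
            have hext1 : ∑ a ∈ Finset.range (min (j + 1) L + 1),
                L.choose a * cntF qs restL (j + 1 - a) (vSub tt a s) =
                ∑ a ∈ Finset.range (j + 2),
                  L.choose a * cntF qs restL (j + 1 - a) (vSub tt a s) := by
              apply Finset.sum_subset
              · intro a ha
                rw [Finset.mem_range] at ha ⊢
                omega
              · intro a ha han
                rw [Finset.mem_range] at ha han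
                rw [Nat.choose_eq_zero_of_lt (show L < a by omega)]
                simp
            have hext2 : ∑ a ∈ Finset.range (min j L + 1),
                L.choose a * cntF qs restL (j - a) (vSub (vSub tt 1 s) a s) =
                ∑ a ∈ Finset.range (j + 1),
                  L.choose a * cntF qs restL (j - a) (vSub (vSub tt 1 s) a s) := by
              apply Finset.sum_subset
              · intro a ha
                rw [Finset.mem_range] at ha ⊢
                omega
              · intro a ha han
                rw [Finset.mem_range] at ha han
                rw [Nat.choose_eq_zero_of_lt (show L < a by omega)]
                simp
            have hext3 : ∑ a ∈ Finset.range (min (j + 1) (x :: blk').length + 1),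
                (x :: blk').length.choose a * cntF qs restL (j + 1 - a) (vSub tt a s) =
                ∑ a ∈ Finset.range (j + 2),
                  (L + 1).choose a * cntF qs restL (j + 1 - a) (vSub tt a s) := by
              rw [show (x :: blk').length = L + 1 from by simp [hL]]
              apply Finset.sum_subset
              · intro a ha
                rw [Finset.mem_range] at ha ⊢
                omega
              · intro a ha han
                rw [Finset.mem_range] at ha han
                rw [Nat.choose_eq_zero_of_lt (show L + 1 < a by omega)]
                simp
            rw [hext1, hext2, hext3]
            rw [Finset.sum_range_succ' (fun a =>
              (L + 1).choose a * cntF qs restL (j + 1 - a) (vSub tt a s)) (j + 1)]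
            rw [Finset.sum_range_succ' (fun a =>
              L.choose a * cntF qs restL (j + 1 - a) (vSub tt a s)) (j + 1)]
            have hre : ∀ a, vSub (vSub tt 1 s) a s = vSub tt (a + 1) s := fun a =>
              vSub_one_vSub tt s a
            simp only [hre]
            have hps : ∀ a ∈ Finset.range (j + 1),
                (L + 1).choose (a + 1) * cntF qs restL (j + 1 - (a + 1)) (vSub tt (a + 1) s) =
                L.choose a * cntF qs restL (j - a) (vSub tt (a + 1) s) +
                L.choose (a + 1) * cntF qs restL (j + 1 - (a + 1)) (vSub tt (a + 1) s) := by
              intro a _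
              rw [show L + 1 = L.succ from rfl, show a + 1 = a.succ from rfl,
                Nat.choose_succ_succ]
              rw [show j + 1 - (a + 1) = j - a from by omega]
              ring
            rw [Finset.sum_congr rfl hps, Finset.sum_add_distrib]
            simp only [Nat.choose_zero_right, Nat.sub_zero]
            omega
      exact block_lemma blk hblkmem k.toNat t ht
    rw [List.flatMap_cons, List.append_assoc, ← hrestL, ← hblk, hcnt, hNval]
    push_cast
    rfl

theorem length_pyRange_one_lt (n : Int) (hn : n < 5) :
    (PySem.List.pyRange 1 (n + 1)).length < 5 := by
  unfold PySem.List.pyRange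
  simp only [if_neg (by norm_num : ¬ (1:Int) = 0)]
  rw [if_pos (by norm_num)]
  by_cases h : (1:Int) < n + 1
  · rw [if_pos h]
    simp only [List.length_map, List.length_range]
    omega
  · rw [if_neg h]
    simp

-- ===== VERDICT (by name: the statement is the Claim_ definition above) =====
theorem solution_spec : Claim_equal_solution := by
  intro n q ans _ hpre
  unfold Spec_solution solution solution_alt
  simp only []
  rw [PySem.List.foldl_count_if
    (fun combination => checkA (q.map (fun a => PySem.Set.ofList a)) ans
      (PySem.Set.ofList combination) (PySem.List.pyRange 0 (q.length : Int)))]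
  by_cases hn : n < 5
  · rw [if_pos hn, combosK_nil_of_lt 5 _ (length_pyRange_one_lt n hn)]
    simp
  · rw [if_neg hn]
    rw [Int.not_lt] at hn
    have hpre' : q.length ≤ ans.length := by
      rcases hpre with h | h
      · exact h
      · omega
    clear hpre
    set qs := q.map (fun attempts => PySem.Set.ofList attempts) with hqs
    set targets := (List.range q.length).map (fun i : Nat => PySem.List.pyGetD ans (i : Int) 0)
      with htargets
    set rel := bRel n q with hrel
    set rng := PySem.List.pyRange 1 (n + 1) with hrng
    set freeL := rng.filter (fun x => !(rel.contains x)) with hfreeL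
    have hlen_t : targets.length = qs.length := by simp [htargets, hqs]
    -- step 1: A's count is cntF over the range
    have hstep1 : (combosK 5 rng).countP
          (fun combination => checkA qs ans (PySem.Set.ofList combination)
            (PySem.List.pyRange 0 (q.length : Int))) =
        cntF qs rng 5 targets := by
      unfold cntF
      apply List.countP_congr
      intro c hcmem
      have hnd : c.Nodup :=
        (sublist_of_mem_combosK 5 _ c hcmem).nodup (nodup_pyRange_one 1 (n + 1))
      rw [decide_eq_true_iff]
      exact checkA_iff q ans c hnd hpre'
    -- step 2: the range splits into rel ++ freeL up to permutation
    have hrelsub : ∀ x ∈ rel, x ∈ rng := by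
      intro x hx
      rw [hrel, mem_bRel] at hx
      rw [hrng, PySem.List.mem_pyRange_one]
      omega
    have hfil : (rng.filter (fun x => rel.contains x)).Perm rel := by
      rw [List.perm_ext_iff_of_nodup
        (List.Nodup.filter _ (by rw [hrng]; exact nodup_pyRange_one 1 (n + 1)))
        (by rw [hrel]; exact nodup_bRel n q)]
      intro a
      rw [List.mem_filter, List.contains_iff_mem]
      constructor
      · exact fun h => h.2
      · exact fun h => ⟨hrelsub a h, h⟩
    have hperm1 : rng.Perm (rel ++ freeL) := by
      refine ((List.filter_append_perm (fun x => rel.contains x) rng).symm).trans ?_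
      rw [hfreeL]
      exact List.Perm.append_right _ hfil
    -- step 3: rel splits into its signature blocks
    have hperm2 : rel.Perm ((PySem.Set.ofList (rel.map (bSig qs))).flatMap
        (fun s => rel.filter (fun x => bSig qs x == s))) := perm_partition (bSig qs) rel
    set K := PySem.Set.ofList (rel.map (bSig qs)) with hKdef
    -- step 4: the groups dict lists exactly the blocks' signatures and sizes
    have hglist : (bGroups qs rel).items =
        K.map (fun s => (s, ((rel.filter (fun x => bSig qs x == s)).length : Int))) := by
      rw [bGroups_eq_counter, PySem.Dict.items_counter]
      rw [hKdef]
      apply List.map_congr_left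
      intro s _
      have : List.count s (rel.map (bSig qs)) =
          (rel.filter (fun x => bSig qs x == s)).length := by
        rw [List.count_eq_countP, List.countP_map, ← List.countP_eq_length_filter]
        rfl
      rw [this]
    -- step 5: the free pool has the free count and empty signatures
    have hlen_rng : ((rng.length : Nat) : Int) = n := by
      rw [hrng]; exact length_pyRange_one n (by omega)
    have hlen_split : rng.length = rel.length + freeL.length := by
      have := hperm1.length_eq
      simpa using this
    have hfreecnt : n - ((rel.length : Nat) : Int) = ((freeL.length : Nat) : Int) := by
      rw [← hlen_rng]
      rw [hlen_split]
      push_cast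
      ring
    have hfree : ∀ x ∈ freeL, ∀ s ∈ qs, PySem.Set.contains s x = false := by
      intro x hx s hs
      rw [hfreeL, List.mem_filter] at hx
      have hxrng := hx.1
      have hxnot : ¬ x ∈ rel := by
        have := hx.2
        rw [Bool.not_eq_eq_eq_not, Bool.not_true, ← Bool.not_eq_true,
          List.contains_iff_mem] at this
        exact this
      rw [hrng, PySem.List.mem_pyRange_one] at hxrng
      rw [hqs, List.mem_map] at hs
      obtain ⟨attempts, hat, rfl⟩ := hs
      rw [← Bool.not_eq_true]
      intro hcon
      apply hxnot
      rw [hrel, mem_bRel]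
      refine ⟨?_, by omega, by omega⟩
      have : x ∈ PySem.Set.ofList attempts := by
        rw [← List.contains_iff_mem]
        exact hcon
      rw [PySem.Set.mem_ofList] at this
      exact List.mem_flatten.mpr ⟨attempts, hat, this⟩
    -- step 6: keys have the right length
    have hK : ∀ s ∈ K, s.length = qs.length := by
      intro s hsK
      rw [hKdef, PySem.Set.mem_ofList, List.mem_map] at hsK
      obtain ⟨x, -, rfl⟩ := hsK
      simp [bSig]
    -- assemble
    rw [hstep1]
    rw [cnt_perm qs rng (rel ++ freeL) hperm1 5 targets hlen_t]
    rw [cnt_perm qs (rel ++ freeL)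
      ((K.flatMap (fun s => rel.filter (fun x => bSig qs x == s))) ++ freeL)
      (List.Perm.append_right freeL hperm2) 5 targets hlen_t]
    rw [hglist, hfreecnt]
    rw [bRec_eq_cnt qs rel freeL hfree K hK 5 (by norm_num) targets hlen_t]
    norm_num
    rfl
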